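-- pv_equiv track=rewrite | github.com/maxbaydi/ai-part-generator | bridge/music_notation.py | format_chord_tones_as_notes
-- ===== SOURCE A (Python) =====
-- from typing import Any, Dict, List, Optional, Tuple
--
-- NOTE_NAMES = ["C", "C#", "D", "D#", "E", "F", "F#", "G", "G#", "A", "A#", "B"]
--
-- NOTE_NAMES_FLAT = ["C", "Db", "D", "Eb", "E", "F", "Gb", "G", "Ab", "A", "Bb", "B"]
--
-- def midi_to_note(pitch: int, use_flats: bool = False) -> str:
--     if pitch < 0 or pitch > 127:
--         pitch = max(0, min(127, pitch))
--     note_names = NOTE_NAMES_FLAT if use_flats else NOTE_NAMES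
--     note = note_names[pitch % 12]
--     octave = (pitch // 12) - 1
--     return f"{note}{octave}"
--
-- def format_chord_tones_as_notes(
--     chord_tones: List[int],
--     instrument_range: Tuple[int, int],
--     chord_name: str = "",
-- ) -> str:
--     if not chord_tones:
--         return ""
--
--     low, high = instrument_range
--
--     notes_in_range = []
--     for pc in chord_tones:
--         for octave in range(-1, 10):
--             midi = pc + (octave + 1) * 12
--             if low <= midi <= high:
--                 notes_in_range.append(midi_to_note(midi))
--
--     if chord_name:
--         return f"{chord_name}: {', '.join(notes_in_range[:8])}"
--     return ", ".join(notes_in_range[:8])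
-- ===== SOURCE B (Python) =====
-- NOTE_NAMES = ["C", "C#", "D", "D#", "E", "F", "F#", "G", "G#", "A", "A#", "B"]
--
-- def _note_of(m):
--     m = 0 if m < 0 else 127 if m > 127 else m
--     o, r = divmod(m, 12)
--     return NOTE_NAMES[r] + str(o - 1)
--
-- def format_chord_tones_as_notes(chord_tones, instrument_range, chord_name=""):
--     if not chord_tones:
--         return ""
--     low, high = instrument_range
--     parts = []
--     need = 8
--     for pc in chord_tones:
--         if need == 0:
--             break
--         # closed-form octave window: low <= pc+12k <= high, k in [0,10]
--         k = max(0, -((pc - low) // 12))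
--         kend = min(10, (high - pc) // 12)
--         while k <= kend and need > 0:
--             parts.append(_note_of(pc + 12 * k))
--             need -= 1
--             k += 1
--     joined = ", ".join(parts)
--     return f"{chord_name}: {joined}" if chord_name else joined
-- ===== Notes on version B (the rewrite author's own statement) =====
-- stated objective: faster
-- what changed: Instead of scanning 11 octaves per pitch class, filtering, building the full list and truncating, B computes the valid octave window in closed form and emits notes under an early-stopping budget of 8, never building more than the 8 notes that are kept.
import Mathlib
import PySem

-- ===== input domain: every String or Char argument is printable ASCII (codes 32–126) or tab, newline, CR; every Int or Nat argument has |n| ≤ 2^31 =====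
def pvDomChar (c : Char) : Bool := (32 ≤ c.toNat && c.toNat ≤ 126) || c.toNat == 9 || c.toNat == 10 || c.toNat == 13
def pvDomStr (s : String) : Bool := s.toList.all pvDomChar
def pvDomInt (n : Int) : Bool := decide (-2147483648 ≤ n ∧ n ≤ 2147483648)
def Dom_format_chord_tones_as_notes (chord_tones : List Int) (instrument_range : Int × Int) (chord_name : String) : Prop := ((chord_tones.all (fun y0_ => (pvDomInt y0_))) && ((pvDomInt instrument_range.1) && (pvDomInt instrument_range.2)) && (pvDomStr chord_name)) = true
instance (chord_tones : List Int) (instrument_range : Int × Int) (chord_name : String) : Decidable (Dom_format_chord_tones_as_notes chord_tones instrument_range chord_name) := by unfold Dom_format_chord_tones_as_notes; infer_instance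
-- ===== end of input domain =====

-- B replaces A's 11-octave scan, full-list build and final truncation by a closed-form octave
-- window per pitch class emitted under an early-stopping budget of 8 notes (alternative algorithm).

-- ===== PORT A =====
def pvNOTE_NAMES : List String := ["C", "C#", "D", "D#", "E", "F", "F#", "G", "G#", "A", "A#", "B"]
def pvNOTE_NAMES_FLAT : List String := ["C", "Db", "D", "Eb", "E", "F", "Gb", "G", "Ab", "A", "Bb", "B"]

def midi_to_note (pitch : Int) (use_flats : Bool) : String :=
  let pitch := if pitch < 0 || pitch > 127 then max 0 (min 127 pitch) else pitch
  let note_names := if use_flats then pvNOTE_NAMES_FLAT else pvNOTE_NAMES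
  -- index pitch % 12 is always in [0,11], so the list access never raises; getD "" is never hit
  let note := (PySem.List.pyGet? note_names (PySem.Int.mod pitch 12)).getD ""
  note ++ PySem.Int.toStr (PySem.Int.floordiv pitch 12 - 1)

def format_chord_tones_as_notes (chord_tones : List Int) (instrument_range : Int × Int) (chord_name : String) : String :=
  if chord_tones = [] then ""
  else
    let low := instrument_range.1
    let high := instrument_range.2
    let notes_in_range : List String :=
      chord_tones.foldl (fun acc pc =>
        (PySem.List.pyRange (-1) 10 1).foldl (fun acc octave =>
          let midi := pc + (octave + 1) * 12
          if low ≤ midi ∧ midi ≤ high then acc ++ [midi_to_note midi false] else acc) acc) []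
    if chord_name ≠ "" then
      chord_name ++ ": " ++ PySem.Str.join ", " (notes_in_range.take 8)
    else PySem.Str.join ", " (notes_in_range.take 8)

-- ===== PORT B =====
-- _note_of: clamp, one divmod, direct table lookup
def noteOf (m : Int) : String :=
  let c : Int := if m < 0 then 0 else if m > 127 then 127 else m
  let o := PySem.Int.floordiv c 12   -- divmod(c, 12)
  let r := PySem.Int.mod c 12
  ((PySem.List.pyGet? pvNOTE_NAMES r).getD "") ++ PySem.Int.toStr (o - 1)

-- the inner while loop: emit notes k, k+1, … while the window (cnt entries) and the budget last
def collectPc : Int → Int → Nat → Nat → List String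
  | _, _, 0, _ => []
  | _, _, _+1, 0 => []
  | pc, k, cnt+1, need+1 => noteOf (pc + 12 * k) :: collectPc pc (k + 1) cnt need

-- the for loop over pitch classes, carrying the remaining budget
def collect : List Int → Int → Int → Nat → List String
  | [], _, _, _ => []
  | _ :: _, _, _, 0 => []
  | pc :: rest, low, high, need+1 =>
      let kstart := max 0 (-(PySem.Int.floordiv (pc - low) 12))
      let kend := min 10 (PySem.Int.floordiv (high - pc) 12)
      let w := collectPc pc kstart (kend + 1 - kstart).toNat (need + 1)
      w ++ collect rest low high (need + 1 - w.length)

def format_chord_tones_as_notes_alt (chord_tones : List Int) (instrument_range : Int × Int) (chord_name : String) : String :=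
  if chord_tones = [] then ""
  else
    let joined := PySem.Str.join ", " (collect chord_tones instrument_range.1 instrument_range.2 8)
    if chord_name ≠ "" then chord_name ++ ": " ++ joined else joined

-- ===== PRECONDITION & SPEC =====
def Spec_format_chord_tones_as_notes (chord_tones : List Int) (instrument_range : Int × Int) (chord_name : String) (out : String) : Prop := out = format_chord_tones_as_notes_alt chord_tones instrument_range chord_name
instance (chord_tones : List Int) (instrument_range : Int × Int) (chord_name : String) (out : String) : Decidable (Spec_format_chord_tones_as_notes chord_tones instrument_range chord_name out) := by unfold Spec_format_chord_tones_as_notes; infer_instance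

-- ===== CLAIM =====
def Claim_equal_format_chord_tones_as_notes : Prop := ∀ (chord_tones : List Int) (instrument_range : Int × Int) (chord_name : String), Dom_format_chord_tones_as_notes chord_tones instrument_range chord_name → Spec_format_chord_tones_as_notes chord_tones instrument_range chord_name (format_chord_tones_as_notes chord_tones instrument_range chord_name)

-- ===== LEMMAS AND PROOFS =====

theorem pv_noteOf_eq (m : Int) : noteOf m = midi_to_note m false := by
  unfold noteOf midi_to_note
  have h : (if m < 0 then (0:Int) else if m > 127 then 127 else m)
      = (if m < 0 || m > 127 then max 0 (min 127 m) else m) := by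
    split_ifs with h1 h2 h3 <;> simp_all <;> omega
  simp only [h]
  simp

-- the while loop equals "take need" of the full window, written as a range
theorem pv_collectPc_eq (cnt : Nat) : ∀ (k : Int) (need : Nat) (pc : Int),
    collectPc pc k cnt need
      = ((PySem.List.pyRange k (k + cnt) 1).map
          (fun j => midi_to_note (pc + 12 * j) false)).take need := by
  induction cnt with
  | zero =>
      intro k need pc
      rw [show k + ((0:Nat):Int) = k by push_cast; ring, PySem.List.pyRange_one_eq_nil le_rfl]
      cases need <;> rfl
  | succ n ih =>
      intro k need pc
      rw [PySem.List.pyRange_one_cons (by push_cast; omega)]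
      cases need with
      | zero => rfl
      | succ m =>
          simp only [List.map_cons, List.take_succ_cons, collectPc, pv_noteOf_eq]
          have harg : (k + ((n + 1 : Nat) : Int)) = k + 1 + (n : Nat) := by push_cast; ring
          rw [ih (k + 1) m pc, harg]

-- the for loop with budget equals "take need" of the flattened full windows
theorem pv_collect_eq (l : List Int) : ∀ (need : Nat) (low high : Int),
    collect l low high need
      = (l.flatMap (fun pc =>
          (PySem.List.pyRange (max 0 (-(PySem.Int.floordiv (pc - low) 12)))
                              (min 10 (PySem.Int.floordiv (high - pc) 12) + 1) 1).map
            (fun j => midi_to_note (pc + 12 * j) false))).take need := by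
  induction l with
  | nil => intro need low high; simp [collect]
  | cons pc rest ih =>
      intro need low high
      cases need with
      | zero => simp [collect]
      | succ m =>
          simp only [collect, List.flatMap_cons]
          set kstart : Int := max 0 (-(PySem.Int.floordiv (pc - low) 12)) with hks
          set kend : Int := min 10 (PySem.Int.floordiv (high - pc) 12) with hke
          have hrange : PySem.List.pyRange kstart (kend + 1) 1
              = PySem.List.pyRange kstart (kstart + ((kend + 1 - kstart).toNat : Nat)) 1 := by
            by_cases h : kstart ≤ kend + 1
            · rw [show kstart + (((kend + 1 - kstart).toNat : Nat) : Int) = kend + 1 by omega]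
            · rw [PySem.List.pyRange_one_eq_nil (by omega),
                  PySem.List.pyRange_one_eq_nil (by omega)]
          rw [pv_collectPc_eq, ← hrange, ih, List.take_append]
          congr 2
          have h1 : ((PySem.List.pyRange kstart (kend + 1) 1).map
              (fun j => midi_to_note (pc + 12 * j) false)).length
              = (kend + 1 - kstart).toNat := by
            simp [PySem.List.length_pyRange_one]
          have h2 : ((((PySem.List.pyRange kstart (kend + 1) 1).map
              (fun j => midi_to_note (pc + 12 * j) false)).take (m + 1)).length)
              = min (m + 1) ((PySem.List.pyRange kstart (kend + 1) 1).map
                  (fun j => midi_to_note (pc + 12 * j) false)).length := by simp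
          omega

-- filtering an interval condition out of a contiguous range yields a contiguous range
theorem pv_filter_interval (n : Nat) : ∀ (lo a b : Int),
    (PySem.List.pyRange lo (lo + n) 1).filter (fun x => decide (a ≤ x ∧ x ≤ b))
      = PySem.List.pyRange (max lo a) (min (lo + n) (b + 1)) 1 := by
  induction n with
  | zero =>
      intro lo a b
      rw [show lo + (0:Nat) = lo by push_cast; ring]
      rw [PySem.List.pyRange_one_eq_nil (by omega), PySem.List.pyRange_one_eq_nil (by omega)]
      simp
  | succ n ih =>
      intro lo a b
      rw [show lo + ((n:Nat)+1:Nat) = (lo + n) + 1 by push_cast; ring]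
      rw [PySem.List.pyRange_one_succ_right (by omega), List.filter_append, ih]
      by_cases hb : b < lo + n
      · have h1 : min (lo + n) (b + 1) = min (lo + n + 1) (b + 1) := by omega
        simp only [List.filter_cons, List.filter_nil]
        rw [show (decide (a ≤ lo + n ∧ lo + n ≤ b)) = false by simp; omega]
        simp [h1]
      · by_cases ha : a ≤ lo + n
        · simp only [List.filter_cons, List.filter_nil]
          rw [show (decide (a ≤ lo + n ∧ lo + n ≤ b)) = true by simp; omega]
          have h1 : min (lo + n) (b + 1) = lo + n := by omega
          have h2 : min (lo + n + 1) (b + 1) = lo + n + 1 := by omega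
          rw [h1, h2, PySem.List.pyRange_one_succ_right (by omega)]
          simp
        · simp only [List.filter_cons, List.filter_nil]
          rw [show (decide (a ≤ lo + n ∧ lo + n ≤ b)) = false by simp; omega]
          rw [PySem.List.pyRange_one_eq_nil (by omega), PySem.List.pyRange_one_eq_nil (by omega)]
          simp

theorem pv_foldl_ite (l : List Int) (p : Int → Prop) [DecidablePred p] (f : Int → String)
    (acc : List String) :
    l.foldl (fun acc x => if p x then acc ++ [f x] else acc) acc
      = acc ++ (l.filter (fun x => decide (p x))).map f := by
  induction l generalizing acc with
  | nil => simp
  | cons x xs ih => simp only [List.foldl_cons, List.filter_cons]; split_ifs <;> simp_all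

-- A's inner octave scan for one pitch class equals the closed-form window
theorem pv_inner_eq (low high pc : Int) (acc : List String) :
    (PySem.List.pyRange (-1) 10 1).foldl (fun acc octave =>
        if low ≤ pc + (octave + 1) * 12 ∧ pc + (octave + 1) * 12 ≤ high
        then acc ++ [midi_to_note (pc + (octave + 1) * 12) false] else acc) acc
      = acc ++ (PySem.List.pyRange (max 0 (-(PySem.Int.floordiv (pc - low) 12)))
                            (min 10 (PySem.Int.floordiv (high - pc) 12) + 1) 1).map
          (fun j => midi_to_note (pc + 12 * j) false) := by
  have h12 : (0:Int) < 12 := by norm_num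
  rw [pv_foldl_ite]
  have hcond : (PySem.List.pyRange (-1) 10 1).filter
        (fun octave => decide (low ≤ pc + (octave + 1) * 12 ∧ pc + (octave + 1) * 12 ≤ high))
      = (PySem.List.pyRange (-1) 10 1).filter
        (fun octave => decide ((-(PySem.Int.floordiv (pc - low) 12)) - 1 ≤ octave ∧
                               octave ≤ PySem.Int.floordiv (high - pc) 12 - 1)) := by
    apply List.filter_congr
    intro x _
    rw [PySem.Int.floordiv_eq_ediv_of_pos h12, PySem.Int.floordiv_eq_ediv_of_pos h12,
        decide_eq_decide]
    omega
  rw [hcond]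
  rw [show (10:Int) = (-1:Int) + ((11:Nat):Int) by norm_num, pv_filter_interval]
  congr 1
  set klo : Int := -(PySem.Int.floordiv (pc - low) 12) with hklo
  set khi : Int := PySem.Int.floordiv (high - pc) 12 with hkhi
  have hM : max (-1) (klo - 1) = max 0 klo - 1 := by omega
  have hN : min ((-1:Int) + ((11:Nat):Int)) (khi - 1 + 1) = min 10 khi := by push_cast; omega
  rw [hM, hN]
  set M : Int := max 0 klo
  set N : Int := min 10 khi
  rw [PySem.List.pyRange_one, PySem.List.pyRange_one, List.map_map, List.map_map]
  rw [show (N - (M - 1)).toNat = (N + 1 - M).toNat by omega]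
  apply List.map_congr_left
  intro j _
  simp only [Function.comp_apply]
  congr 1
  ring

-- ===== VERDICT =====
theorem format_chord_tones_as_notes_spec : Claim_equal_format_chord_tones_as_notes := by
  intro chord_tones instrument_range chord_name _
  unfold Spec_format_chord_tones_as_notes
  unfold format_chord_tones_as_notes format_chord_tones_as_notes_alt
  by_cases h : chord_tones = []
  · simp [h]
  · simp only [if_neg h]
    have hfun : (fun (acc : List String) (pc : Int) =>
        (PySem.List.pyRange (-1) 10 1).foldl (fun acc octave =>
          let midi := pc + (octave + 1) * 12
          if instrument_range.1 ≤ midi ∧ midi ≤ instrument_range.2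
          then acc ++ [midi_to_note midi false] else acc) acc)
        = (fun (acc : List String) (pc : Int) =>
            acc ++ (PySem.List.pyRange (max 0 (-(PySem.Int.floordiv (pc - instrument_range.1) 12)))
                            (min 10 (PySem.Int.floordiv (instrument_range.2 - pc) 12) + 1) 1).map
              (fun j => midi_to_note (pc + 12 * j) false)) := by
      funext acc pc
      exact pv_inner_eq instrument_range.1 instrument_range.2 pc acc
    rw [hfun, PySem.List.foldl_append_eq_flatMap,
        pv_collect_eq chord_tones 8 instrument_range.1 instrument_range.2]
    simp
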